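-- pv_equiv track=rewrite | github.com/jcolinpatrick/kryptos | scripts/e_audit_02_strip_stagger.py | stagger_read
-- ===== SOURCE A (Python) =====
-- from typing import Dict, List, Optional, Tuple
--
-- def stagger_read(strips: List[str], offsets: Tuple[int, ...] = None) -> str:
--     """Read vertically through staggered strips.
--
--     Each strip is placed at a horizontal offset. Read column-by-column
--     from left to right, top to bottom within each column.
--     """
--     if offsets is None:
--         offsets = tuple(0 for _ in strips)
--
--     # Build a 2D grid
--     max_end = max(offsets[i] + len(strips[i]) for i in range(len(strips)))
--     grid = {}  # (col, row) → char
--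
--     for row, (strip, offset) in enumerate(zip(strips, offsets)):
--         for col_idx, ch in enumerate(strip):
--             grid[(offset + col_idx, row)] = ch
--
--     # Read column by column, top to bottom
--     result = []
--     for col in range(max_end):
--         for row in range(len(strips)):
--             if (col, row) in grid:
--                 result.append(grid[(col, row)])
--
--     return ''.join(result)
-- ===== SOURCE B (Python) =====
-- def stagger_read(strips, offsets=None):
--     """Read vertically through staggered strips (column-major, rows top to bottom).
--
--     One pass buckets each character under its column; only occupied columns
--     (at nonnegative positions, i.e. inside the read window starting at column 0)
--     are then visited in sorted order.
--     """
--     if offsets is None: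
--         offsets = (0,) * len(strips)
--     pairs = [(off + i, ch)
--              for strip, off in zip(strips, offsets)
--              for i, ch in enumerate(strip)]
--     cols = {}
--     for c, ch in pairs:
--         cols.setdefault(c, []).append(ch)
--     return ''.join(ch for c in sorted(cols) if c >= 0 for ch in cols[c])
-- ===== Notes on version B (the rewrite author's own statement) =====
-- stated objective: faster
-- what changed: B buckets each character under its column in one pass over the strips and then walks only the occupied columns in sorted order, instead of A's building a (col,row)->char grid dict and probing every (col,row) cell of the full max_end x len(strips) rectangle.
import Mathlib
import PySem

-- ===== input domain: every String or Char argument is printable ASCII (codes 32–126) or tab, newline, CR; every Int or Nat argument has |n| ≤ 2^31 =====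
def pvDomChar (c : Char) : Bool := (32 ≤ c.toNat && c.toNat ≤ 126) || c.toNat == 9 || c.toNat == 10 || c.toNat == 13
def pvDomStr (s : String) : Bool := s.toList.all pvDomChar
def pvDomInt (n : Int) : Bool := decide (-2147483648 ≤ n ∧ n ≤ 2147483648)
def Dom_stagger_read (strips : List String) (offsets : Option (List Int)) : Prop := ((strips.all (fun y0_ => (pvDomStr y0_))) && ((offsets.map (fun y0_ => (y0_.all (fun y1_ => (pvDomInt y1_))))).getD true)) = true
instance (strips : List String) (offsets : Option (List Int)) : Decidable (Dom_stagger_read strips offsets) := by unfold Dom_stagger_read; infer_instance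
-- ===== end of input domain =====

-- B buckets the characters by column in one pass and walks only the occupied columns
-- in sorted order, instead of A's probing every (col,row) cell below max_end.

-- ===== PORT A =====
-- A-side helpers: A's intermediate values, lifted to named definitions.
-- ends = the values of the generator  offsets[i] + len(strips[i])  for i in range(len(strips))
-- (offsets[i] raises IndexError when offsets is shorter than strips: excluded by Pre_,
--  so the pyGetD defaults are never reached inside Pre_)
def pvA_ends (strips : List String) (offs : List Int) : List Int :=
  (PySem.List.pyRange 0 (strips.length : Int)).map
    (fun i => PySem.List.pyGetD offs i 0 + PySem.Str.len (PySem.List.pyGetD strips i ""))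

-- max_end = max(ends)   (max() of an empty sequence raises ValueError: excluded by Pre_)
def pvA_maxEnd (strips : List String) (offs : List Int) : Int :=
  ((PySem.List.max? (pvA_ends strips offs) (fun x => x)).getD 0)

-- grid[(offset + col_idx, row)] = ch   for row, (strip, offset) in enumerate(zip(strips, offsets))
def pvA_grid (strips : List String) (offs : List Int) : PySem.Dict (Int × Int) Char :=
  (PySem.List.enumerate (strips.zip offs)).foldl
    (fun g rp => (PySem.List.enumerate rp.2.1.toList).foldl
      (fun g q => g.insert (rp.2.2 + q.1, rp.1) q.2) g)
    PySem.Dict.empty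

-- the column/row scan of A ('(col,row) in grid' + 'grid[(col,row)]' is the match on get?)
def stagger_read_core (strips : List String) (offs : List Int) : String :=
  String.ofList
    ((PySem.List.pyRange 0 (pvA_maxEnd strips offs)).foldl
      (fun acc col => (PySem.List.pyRange 0 (strips.length : Int)).foldl
        (fun acc row => match (pvA_grid strips offs).get? (col, row) with
          | some ch => acc ++ [ch]
          | none => acc) acc)
      [])

def stagger_read (strips : List String) (offsets : Option (List Int)) : String :=
  stagger_read_core strips
    (match offsets with
     | none => strips.map (fun _ => (0 : Int))
     | some o => o)

-- ===== PORT B =====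
-- pairs = [(off + i, ch) for strip, off in zip(strips, offsets) for i, ch in enumerate(strip)]
def pvB_pairs (strips : List String) (offs : List Int) : List (Int × Char) :=
  (strips.zip offs).flatMap
    (fun p => (PySem.List.enumerate p.1.toList).map (fun q => (p.2 + q.1, q.2)))

-- for c, ch in pairs: cols.setdefault(c, []).append(ch)
def pvB_cols (strips : List String) (offs : List Int) : PySem.Dict Int (List Char) :=
  (pvB_pairs strips offs).foldl
    (fun d p => d.modify p.1 [] (fun l => l ++ [p.2])) PySem.Dict.empty

-- ''.join(ch for c in sorted(cols) if c >= 0 for ch in cols[c])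
def stagger_read_alt_core (strips : List String) (offs : List Int) : String :=
  String.ofList
    ((PySem.List.sorted (pvB_cols strips offs).keys (fun c => c)).foldl
      (fun acc c => if (0 : Int) ≤ c then acc ++ (pvB_cols strips offs).getD c [] else acc)
      [])

def stagger_read_alt (strips : List String) (offsets : Option (List Int)) : String :=
  stagger_read_alt_core strips
    (match offsets with
     | none => strips.map (fun _ => (0 : Int))
     | some o => o)

-- ===== PRECONDITION & SPEC =====
-- Pre_ excludes exactly the inputs where the Python A raises: strips = [] (max() of an
-- empty generator is a ValueError) and an explicit offsets list shorter than strips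
-- (offsets[i] is an IndexError).  `offsets.getD (strips.map (fun _ => 0))` is the
-- defaulted offsets list, whose length is strips.length when offsets is none.
def Pre_stagger_read (strips : List String) (offsets : Option (List Int)) : Prop :=
  strips ≠ [] ∧ strips.length ≤ (offsets.getD (strips.map (fun _ => 0))).length
instance (strips : List String) (offsets : Option (List Int)) : Decidable (Pre_stagger_read strips offsets) := by
  unfold Pre_stagger_read; infer_instance

def pvWitness_stagger_read : List String × Option (List Int) := (["ab", "c"], some [1, 0])

def Spec_stagger_read (strips : List String) (offsets : Option (List Int)) (out : String) : Prop :=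
  out = stagger_read_alt strips offsets
instance (strips : List String) (offsets : Option (List Int)) (out : String) : Decidable (Spec_stagger_read strips offsets out) := by
  unfold Spec_stagger_read; infer_instance

-- ===== CLAIM (what is proved, stated in full; the proofs are below) =====
def Claim_equal_stagger_read : Prop := ∀ (strips : List String) (offsets : Option (List Int)), Dom_stagger_read strips offsets → Pre_stagger_read strips offsets → Spec_stagger_read strips offsets (stagger_read strips offsets)

-- ===== LEMMAS AND PROOFS =====

-- the ((col,row),ch) triples of A's grid, in insertion order (proof-only view)
def pvTri (strips : List String) (offs : List Int) : List ((Int × Int) × Char) :=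
  (PySem.List.enumerate (strips.zip offs)).flatMap
    (fun rp => (PySem.List.enumerate rp.2.1.toList).map (fun q => ((rp.2.2 + q.1, rp.1), q.2)))

-- a nested fold is the flat fold over the flattened list
lemma pv_foldl_foldl {α β γ : Type} (f : α → List β) (step : γ → β → γ) :
    ∀ (l : List α) (init : γ),
      l.foldl (fun g a => (f a).foldl step g) init = (l.flatMap f).foldl step init := by
  intro l
  induction l with
  | nil => intro init; simp
  | cons a t ih => intro init; simp [List.foldl_append, ih]

lemma pv_grid_eq_foldl_tri (strips : List String) (offs : List Int) :
    pvA_grid strips offs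
      = (pvTri strips offs).foldl (fun g t => g.insert t.1 t.2) PySem.Dict.empty := by
  unfold pvA_grid pvTri
  have h : (fun (g : PySem.Dict (Int × Int) Char) (rp : Int × (String × Int)) =>
        (PySem.List.enumerate rp.2.1.toList).foldl (fun g q => g.insert (rp.2.2 + q.1, rp.1) q.2) g)
      = fun g rp => (((PySem.List.enumerate rp.2.1.toList).map
          (fun q => ((rp.2.2 + q.1, rp.1), q.2))).foldl (fun g t => g.insert t.1 t.2) g) := by
    funext g rp
    rw [List.foldl_map]
  rw [h, pv_foldl_foldl]

lemma pv_tri_keys_nodup_aux :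
    ∀ (zl : List (Int × (String × Int))), ((zl.map Prod.fst).Nodup) →
    ((zl.flatMap (fun rp => (PySem.List.enumerate rp.2.1.toList).map
        (fun q => ((rp.2.2 + q.1, rp.1), q.2)))).map Prod.fst).Nodup := by
  intro zl
  induction zl with
  | nil => intro _; simp
  | cons hd rest ih =>
    intro hnd
    rw [List.map_cons] at hnd
    have h0 : hd.1 ∉ rest.map Prod.fst := (List.nodup_cons.mp hnd).1
    have hr : (rest.map Prod.fst).Nodup := (List.nodup_cons.mp hnd).2
    rw [List.flatMap_cons, List.map_append, List.nodup_append]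
    refine ⟨?_, ih hr, ?_⟩
    · rw [List.map_map]
      show List.Pairwise (fun a b => a ≠ b) _
      rw [List.pairwise_map]
      have := PySem.List.pairwise_lt_enumerate hd.2.1.toList 0
      exact this.imp (by
        intro a b hab
        simp only [Function.comp, Prod.mk.injEq, ne_eq, not_and]
        intro h _
        omega)
    · intro a ha b hb
      have ha2 : a.2 = hd.1 := by
        rw [List.map_map] at ha
        obtain ⟨q, _, hq⟩ := List.mem_map.mp ha
        rw [← hq]
        rfl
      have hb2 : b.2 ∈ rest.map Prod.fst := by
        obtain ⟨t, ht, hbt⟩ := List.mem_map.mp hb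
        obtain ⟨rp, hrp, htr⟩ := List.mem_flatMap.mp ht
        obtain ⟨q, _, hq⟩ := List.mem_map.mp htr
        have ht2 : t.1.2 = rp.1 := by rw [← hq]
        rw [← hbt, ht2]
        exact List.mem_map.mpr ⟨rp, hrp, rfl⟩
      intro hab
      apply h0
      rw [← ha2, hab]
      exact hb2

lemma pv_tri_keys_nodup (strips : List String) (offs : List Int) :
    ((pvTri strips offs).map Prod.fst).Nodup := by
  unfold pvTri
  apply pv_tri_keys_nodup_aux
  rw [PySem.List.map_fst_enumerate]
  exact PySem.List.nodup_pyRange_one _ _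

lemma pv_grid_items (strips : List String) (offs : List Int) :
    (pvA_grid strips offs).items = pvTri strips offs := by
  rw [pv_grid_eq_foldl_tri]
  have := PySem.Dict.items_foldl_insert_fresh (pvTri strips offs) Prod.fst Prod.snd
      (PySem.Dict.empty)
      (by intro a _; exact PySem.Dict.contains_empty _)
      (pv_tri_keys_nodup strips offs)
  simpa using this

lemma pv_grid_keys_nodup (strips : List String) (offs : List Int) :
    (pvA_grid strips offs).keys.Nodup := by
  have : (pvA_grid strips offs).keys = (pvTri strips offs).map Prod.fst := by
    simp only [PySem.Dict.keys, pv_grid_items]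
  rw [this]
  exact pv_tri_keys_nodup strips offs

lemma pv_filter_eq_singleton {κ ν : Type} [BEq κ] [LawfulBEq κ] :
    ∀ (l : List (κ × ν)) (k : κ) (v : ν), (l.map Prod.fst).Nodup → (k, v) ∈ l →
      l.filter (fun t => t.1 == k) = [(k, v)] := by
  intro l
  induction l with
  | nil => intro k v _ h; simp at h
  | cons hd tl ih =>
    intro k v hnd hmem
    rw [List.map_cons] at hnd
    have h0 : hd.1 ∉ tl.map Prod.fst := (List.nodup_cons.mp hnd).1
    have htl : (tl.map Prod.fst).Nodup := (List.nodup_cons.mp hnd).2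
    rcases List.mem_cons.mp hmem with heq | hmem'
    · subst heq
      rw [List.filter_cons]
      have htlnil : tl.filter (fun t => t.1 == k) = [] := by
        rw [List.filter_eq_nil_iff]
        intro t ht
        simp only [beq_iff_eq]
        intro hkt
        exact h0 (by simpa using List.mem_map.mpr ⟨t, ht, hkt⟩)
      simp [htlnil]
    · have hk : k ∈ tl.map Prod.fst := List.mem_map.mpr ⟨(k, v), hmem', rfl⟩
      have : (hd.1 == k) = false := by
        simp only [beq_eq_false_iff_ne, ne_eq]
        intro h; exact h0 (h ▸ hk)
      rw [List.filter_cons, this]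
      simp only [if_neg Bool.false_ne_true]
      exact ih k v htl hmem'

lemma pv_grid_get_toList (strips : List String) (offs : List Int) (k : Int × Int) :
    ((pvA_grid strips offs).get? k).toList
      = ((pvTri strips offs).filter (fun t => t.1 == k)).map (fun t => t.2) := by
  cases h : (pvA_grid strips offs).get? k with
  | none =>
    have hk : k ∉ (pvA_grid strips offs).keys :=
      (PySem.Dict.get?_eq_none_iff_not_mem_keys _ _).mp h
    have : (pvTri strips offs).filter (fun t => t.1 == k) = [] := by
      rw [List.filter_eq_nil_iff]
      intro t ht
      simp only [beq_iff_eq]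
      intro hkt
      apply hk
      have : (pvA_grid strips offs).keys = (pvTri strips offs).map Prod.fst := by
        simp only [PySem.Dict.keys, pv_grid_items]
      rw [this, ← hkt]
      exact List.mem_map.mpr ⟨t, ht, rfl⟩
    rw [this]; simp
  | some ch =>
    have hmem : (k, ch) ∈ (pvA_grid strips offs).items :=
      (PySem.Dict.get?_eq_some_iff_mem_items _ _ _ (pv_grid_keys_nodup strips offs)).mp h
    rw [pv_grid_items] at hmem
    rw [pv_filter_eq_singleton _ k ch (pv_tri_keys_nodup strips offs) hmem]
    simp

-- regrouping: reading a row-grouped list row by row along the (nodup) row list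
-- recovers the flat column filter
lemma pv_regroup {α β : Type} (c : Int) (G : Int × β → List ((Int × Int) × α)) :
    ∀ (l : List (Int × β)),
      (l.map Prod.fst).Nodup →
      (∀ p ∈ l, ∀ t ∈ G p, t.1.2 = p.1) →
      (l.map Prod.fst).flatMap
        (fun r => ((l.flatMap G).filter (fun t => t.1 == (c, r))).map (fun t => t.2))
        = ((l.flatMap G).filter (fun t => t.1.1 == c)).map (fun t => t.2) := by
  intro l
  induction l with
  | nil => intro _ _; simp
  | cons hd rest ih =>
    intro hnd hrow
    rw [List.map_cons] at hnd
    have hr0 : hd.1 ∉ rest.map Prod.fst := (List.nodup_cons.mp hnd).1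
    have hndr : (rest.map Prod.fst).Nodup := (List.nodup_cons.mp hnd).2
    have hg0 : ∀ t ∈ G hd, t.1.2 = hd.1 := fun t ht => hrow hd (List.mem_cons_self) t ht
    have hrest : ∀ t ∈ rest.flatMap G, t.1.2 ∈ rest.map Prod.fst := by
      intro t ht
      obtain ⟨p, hp, htp⟩ := List.mem_flatMap.mp ht
      rw [hrow p (List.mem_cons_of_mem _ hp) t htp]
      exact List.mem_map.mpr ⟨p, hp, rfl⟩
    rw [List.map_cons, List.flatMap_cons, List.flatMap_cons]
    have h1 : (G hd).filter (fun t => t.1 == (c, hd.1)) = (G hd).filter (fun t => t.1.1 == c) := by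
      apply List.filter_congr
      intro t ht
      have h2 := hg0 t ht
      rcases t with ⟨⟨tc, tr⟩, ta⟩
      have h2' : tr = hd.1 := h2
      subst h2'
      simp [Prod.ext_iff]
    have h2 : (rest.flatMap G).filter (fun t => t.1 == (c, hd.1)) = [] := by
      rw [List.filter_eq_nil_iff]
      intro t ht
      simp only [beq_iff_eq, Prod.ext_iff]
      rintro ⟨_, h⟩
      exact hr0 (h ▸ hrest t ht)
    have h3 : (rest.map Prod.fst).flatMap
          (fun r => (((G hd) ++ rest.flatMap G).filter (fun t => t.1 == (c, r))).map (fun t => t.2))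
        = (rest.map Prod.fst).flatMap
          (fun r => ((rest.flatMap G).filter (fun t => t.1 == (c, r))).map (fun t => t.2)) := by
      apply List.flatMap_congr
      intro r hrm
      rw [List.filter_append]
      have : (G hd).filter (fun t => t.1 == (c, r)) = [] := by
        rw [List.filter_eq_nil_iff]
        intro t ht
        simp only [beq_iff_eq, Prod.ext_iff]
        rintro ⟨_, h⟩
        exact hr0 ((hg0 t ht ▸ h) ▸ hrm)
      rw [this, List.nil_append]
    rw [List.filter_append, h1, h2, List.append_nil]
    rw [h3, ih hndr (fun p hp => hrow p (List.mem_cons_of_mem _ hp))]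
    rw [List.filter_append, List.map_append]

lemma pv_A_char (strips : List String) (offs : List Int)
    (hlen : strips.length ≤ offs.length) :
    stagger_read_core strips offs
      = String.ofList ((PySem.List.pyRange 0 (pvA_maxEnd strips offs)).flatMap
          (fun c => ((pvTri strips offs).filter (fun t => t.1.1 == c)).map (fun t => t.2))) := by
  unfold stagger_read_core
  congr 1
  have hinner : ∀ (acc : List Char) (col : Int),
      (PySem.List.pyRange 0 (strips.length : Int)).foldl
        (fun acc row => match (pvA_grid strips offs).get? (col, row) with
          | some ch => acc ++ [ch] | none => acc) acc
      = acc ++ ((pvTri strips offs).filter (fun t => t.1.1 == col)).map (fun t => t.2) := by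
    intro acc col
    rw [PySem.List.foldl_congr_mem _ _
        (fun acc row => acc ++ ((pvTri strips offs).filter (fun t => t.1 == (col, row))).map (fun t => t.2)) _
        (by
          intro acc row _
          show (match (pvA_grid strips offs).get? (col, row) with
                 | some ch => acc ++ [ch] | none => acc)
              = acc ++ ((pvTri strips offs).filter (fun t => t.1 == (col, row))).map (fun t => t.2)
          rw [← pv_grid_get_toList]
          cases h : (pvA_grid strips offs).get? (col, row) <;> simp)]
    rw [PySem.List.foldl_append_eq_flatMap]
    congr 1
    -- instantiate the regroup lemma with the enumerated rows
    have hzl : ((PySem.List.enumerate (strips.zip offs)).map Prod.fst)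
        = PySem.List.pyRange 0 (strips.length : Int) := by
      rw [PySem.List.map_fst_enumerate]
      have hlz : (0 : Int) + ((strips.zip offs).length : Int) = (strips.length : Int) := by
        rw [List.length_zip]
        push_cast
        omega
      rw [hlz]
    have := pv_regroup col
        (fun rp => (PySem.List.enumerate rp.2.1.toList).map (fun q => ((rp.2.2 + q.1, rp.1), q.2)))
        (PySem.List.enumerate (strips.zip offs))
        (by rw [hzl]; exact PySem.List.nodup_pyRange_one _ _)
        (by
          intro p _ t ht
          obtain ⟨q, _, hq⟩ := List.mem_map.mp ht
          rw [← hq])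
    rw [hzl] at this
    exact this
  rw [PySem.List.foldl_congr_mem _ _
      (fun acc col => acc ++ ((pvTri strips offs).filter (fun t => t.1.1 == col)).map (fun t => t.2)) _
      (by intro acc col _; exact hinner acc col)]
  rw [PySem.List.foldl_append_eq_flatMap]
  simp

lemma pv_pairs_eq_tri_map (strips : List String) (offs : List Int) :
    pvB_pairs strips offs = (pvTri strips offs).map (fun t => (t.1.1, t.2)) := by
  unfold pvB_pairs pvTri
  rw [List.map_flatMap]
  have : (fun (rp : Int × (String × Int)) =>
        ((PySem.List.enumerate rp.2.1.toList).map (fun q => ((rp.2.2 + q.1, rp.1), q.2))).map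
          (fun (t : (Int × Int) × Char) => (t.1.1, t.2)))
      = fun rp => (PySem.List.enumerate rp.2.1.toList).map (fun q => (rp.2.2 + q.1, q.2)) := by
    funext rp
    rw [List.map_map]
    rfl
  rw [this]
  rw [← List.flatMap_map Prod.snd
      (fun (p : String × Int) => (PySem.List.enumerate p.1.toList).map (fun q => (p.2 + q.1, q.2)))
      (PySem.List.enumerate (strips.zip offs))]
  rw [PySem.List.map_snd_enumerate]

lemma pv_B_char (strips : List String) (offs : List Int) :
    stagger_read_alt_core strips offs
      = String.ofList (((PySem.List.sorted (PySem.Set.ofList ((pvB_pairs strips offs).map Prod.fst)) (fun c => c)).filter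
            (fun c => decide ((0 : Int) ≤ c))).flatMap
          (fun c => ((pvB_pairs strips offs).filter (fun t => t.1 == c)).map (fun t => t.2))) := by
  unfold stagger_read_alt_core
  congr 1
  have hkeys : (pvB_cols strips offs).keys = PySem.Set.ofList ((pvB_pairs strips offs).map Prod.fst) := by
    unfold pvB_cols
    rw [PySem.Dict.keys_foldl_modify_key (pvB_pairs strips offs) Prod.fst []
        (fun d p => fun l => l ++ [p.2])]
    rw [PySem.Dict.keys_empty]
    rfl
  have hgetD : ∀ c, (pvB_cols strips offs).getD c []
      = ((pvB_pairs strips offs).filter (fun t => t.1 == c)).map (fun t => t.2) := by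
    intro c
    unfold pvB_cols
    rw [PySem.Dict.getD_foldl_modify_append]
    rw [PySem.Dict.getD_empty, List.nil_append]
  rw [PySem.List.foldl_ite_eq_foldl_filter (fun c => (0 : Int) ≤ c)
      (fun acc c => acc ++ (pvB_cols strips offs).getD c [])]
  rw [PySem.List.foldl_append_eq_flatMap]
  rw [List.nil_append, hkeys]
  exact List.flatMap_congr (fun c _ => hgetD c)

lemma pv_col_lt_maxEnd (strips : List String) (offs : List Int) :
    ∀ x ∈ pvB_pairs strips offs, x.1 < pvA_maxEnd strips offs := by
  intro x hx
  obtain ⟨p, hp, hxp⟩ := List.mem_flatMap.mp hx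
  obtain ⟨q, hq, hqx⟩ := List.mem_map.mp hxp
  obtain ⟨k, hk, hqk⟩ := (PySem.List.mem_enumerate_iff _ _ _).mp hq
  obtain ⟨j, hj, hjp⟩ := List.mem_iff_getElem.mp hp
  rw [List.length_zip] at hj
  have hjs : j < strips.length := lt_of_lt_of_le hj (min_le_left _ _)
  have hjo : j < offs.length := lt_of_lt_of_le hj (min_le_right _ _)
  have hpj : p = (strips[j], offs[j]) := by rw [← hjp]; exact List.getElem_zip
  -- the end for row j is in ends
  have hje : ((PySem.List.pyGetD offs (j : Int) 0) + PySem.Str.len (PySem.List.pyGetD strips (j : Int) ""))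
      ∈ pvA_ends strips offs := by
    unfold pvA_ends
    apply List.mem_map.mpr
    exact ⟨(j : Int), PySem.List.mem_pyRange_one.mpr (by omega), rfl⟩
  have hgo : PySem.List.pyGetD offs (j : Int) 0 = offs[j] := by
    rw [PySem.List.pyGetD_of_nonneg _ _ (by omega)]
    simp [List.getD_eq_getElem?_getD, hjo]
  have hgs : PySem.List.pyGetD strips (j : Int) "" = strips[j] := by
    rw [PySem.List.pyGetD_of_nonneg _ _ (by omega)]
    simp [List.getD_eq_getElem?_getD, hjs]
  have hlens : PySem.Str.len strips[j] = (strips[j].toList.length : Int) := by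
    simp [PySem.Str.len_eq]
  -- x.1 = offs[j] + k with k < length
  have hx1 : x.1 = offs[j] + (k : Int) := by
    have hp2 : p.2 = offs[j] := by rw [hpj]
    rw [← hqx, hqk]
    simp [hp2]
  have hklen : k < strips[j].toList.length := by
    rw [hpj] at hk; exact hk
  unfold pvA_maxEnd
  cases hm : PySem.List.max? (pvA_ends strips offs) (fun x => x) with
  | none =>
    exfalso
    have := (PySem.List.max?_eq_none_iff (pvA_ends strips offs) (fun x => x)).mp hm
    rw [this] at hje
    exact absurd hje (List.not_mem_nil)
  | some m =>
    have hle := PySem.List.max?_isMax hm _ hje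
    simp only [Option.getD_some]
    rw [hgo, hgs, hlens] at hle
    omega

lemma pv_flatMap_filter_of_empty {α β : Type} (p : α → Bool) (g : α → List β) :
    ∀ (l : List α), (∀ x ∈ l, p x = false → g x = []) →
      l.flatMap g = (l.filter p).flatMap g := by
  intro l
  induction l with
  | nil => intro _; simp
  | cons a t ih =>
    intro h
    rw [List.flatMap_cons, List.filter_cons]
    cases hp : p a with
    | true => rw [if_pos rfl, List.flatMap_cons, ih (fun x hx => h x (List.mem_cons_of_mem _ hx))]
    | false =>
      rw [if_neg (by simp)]
      rw [h a List.mem_cons_self hp, List.nil_append,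
        ih (fun x hx => h x (List.mem_cons_of_mem _ hx))]

lemma pv_cols_eq (strips : List String) (offs : List Int) :
    (PySem.List.pyRange 0 (pvA_maxEnd strips offs)).filter
        (fun c => decide (c ∈ (pvB_pairs strips offs).map Prod.fst))
      = (PySem.List.sorted (PySem.Set.ofList ((pvB_pairs strips offs).map Prod.fst)) (fun c => c)).filter
          (fun c => decide ((0 : Int) ≤ c)) := by
  have hperm : (PySem.List.sorted (PySem.Set.ofList ((pvB_pairs strips offs).map Prod.fst)) (fun c => c)).Perm
      (PySem.Set.ofList ((pvB_pairs strips offs).map Prod.fst)) :=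
    PySem.List.sorted_perm _ _ _
  have hsnd : (PySem.List.sorted (PySem.Set.ofList ((pvB_pairs strips offs).map Prod.fst)) (fun c => c)).Nodup :=
    hperm.nodup_iff.mpr (PySem.Set.nodup_ofList _)
  have hslt : List.Pairwise (· < ·)
      (PySem.List.sorted (PySem.Set.ofList ((pvB_pairs strips offs).map Prod.fst)) (fun c => c)) := by
    have hle := PySem.List.sorted_pairwise (PySem.Set.ofList ((pvB_pairs strips offs).map Prod.fst)) (fun c => c)
    exact (hle.and hsnd).imp (fun h => lt_of_le_of_ne h.1 h.2)
  apply List.Perm.eq_of_pairwise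
      (le := fun (a b : Int) => a < b)
      (fun a b _ _ h1 h2 => absurd h2 (lt_asymm h1))
      ((PySem.List.pairwise_lt_pyRange_one 0 _).filter _)
      (hslt.filter _)
  apply (List.perm_ext_iff_of_nodup
      (((PySem.List.nodup_pyRange_one 0 _)).filter _)
      (hsnd.filter _)).mpr
  intro a
  rw [List.mem_filter, List.mem_filter, PySem.List.mem_pyRange_one, hperm.mem_iff,
    PySem.Set.mem_ofList]
  simp only [decide_eq_true_eq]
  constructor
  · rintro ⟨⟨h0, _⟩, hm⟩
    exact ⟨hm, h0⟩
  · rintro ⟨hm, h0⟩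
    obtain ⟨x, hx, hxa⟩ := List.mem_map.mp hm
    refine ⟨⟨h0, ?_⟩, hm⟩
    rw [← hxa]
    exact pv_col_lt_maxEnd strips offs x hx

lemma pv_core_eq (strips : List String) (offs : List Int)
    (hlen : strips.length ≤ offs.length) :
    stagger_read_core strips offs = stagger_read_alt_core strips offs := by
  rw [pv_A_char strips offs hlen, pv_B_char strips offs]
  congr 1
  -- the per-column buckets of the two sides coincide
  have hbucket : ∀ c : Int,
      ((pvTri strips offs).filter (fun t => t.1.1 == c)).map (fun t => t.2)
        = ((pvB_pairs strips offs).filter (fun t => t.1 == c)).map (fun t => t.2) := by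
    intro c
    rw [pv_pairs_eq_tri_map, List.filter_map, List.map_map]
    rfl
  -- drop the unoccupied columns from A's range
  rw [List.flatMap_congr (fun c _ => hbucket c)]
  rw [pv_flatMap_filter_of_empty (fun c => decide (c ∈ (pvB_pairs strips offs).map Prod.fst)) _ _
      (by
        intro c _ hc
        rw [List.map_eq_nil_iff, List.filter_eq_nil_iff]
        intro t ht
        simp only [beq_iff_eq]
        intro h1
        have : c ∈ (pvB_pairs strips offs).map Prod.fst := List.mem_map.mpr ⟨t, ht, h1⟩
        simp [this] at hc)]
  rw [pv_cols_eq strips offs]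

-- ===== VERDICT (by name: the statement is the Claim_ definition above) =====
theorem stagger_read_spec : Claim_equal_stagger_read := by
  intro strips offsets _hdom hpre
  unfold Spec_stagger_read stagger_read stagger_read_alt
  cases offsets with
  | none => exact pv_core_eq _ _ (by simp)
  | some o => exact pv_core_eq _ _ (by simpa using hpre.2)
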